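-- pv_equiv track=rewrite | github.com/leus/PesFacemod | PesFacemod/FmdlManager.py | halffloat2float
-- ===== SOURCE A (Python) =====
-- def halffloat2float(float16):
--     sign = int((float16 >> 15) & 0x00000001)
--     exponent = int((float16 >> 10) & 0x0000001f)
--     fraction = int(float16 & 0x000003ff)
--     if exponent == 0:
--         if fraction == 0:
--             return int(sign << 31)
--         else:
--             while not (fraction & 0x00000400):
--                 fraction = fraction << 1
--                 exponent -= 1
--             exponent += 1
--             fraction &= ~0x00000400
--     elif exponent == 31:
--         if fraction == 0:
--             return int((sign << 31) | 0x7f800000)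
--         else:
--             return int((sign << 31) | 0x7f800000 | (fraction << 13))
--
--     exponent = exponent + (127 - 15)
--     fraction = fraction << 13
--     result = int((sign << 31) | (exponent << 23) | fraction)
--     return result
-- ===== SOURCE B (Python) =====
-- def halffloat2float(float16):
--     sign = (float16 >> 15) & 0x00000001
--     exponent = (float16 >> 10) & 0x0000001f
--     fraction = float16 & 0x000003ff
--     if exponent == 31:
--         return int((sign << 31) | 0x7f800000 | (fraction << 13))
--     if exponent == 0 and fraction == 0:
--         return int(sign << 31)
--     if exponent == 0:
--         # closed-form normalization instead of the shift-until-set loop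
--         shift = 11 - fraction.bit_length()
--         exponent = 1 - shift
--         fraction = (fraction << shift) & 0x3ff
--     return int((sign << 31) | ((exponent + 112) << 23) | (fraction << 13))
-- ===== Notes on version B (the rewrite author's own statement) =====
-- stated objective: simpler
-- what changed: Replaces A's iterative subnormal normalization loop (shift left until bit 10 is set, decrementing the exponent each step) with a closed form computed from fraction.bit_length(), and merges A's duplicated infinity/NaN branches and final assembly into one return expression.
import Mathlib
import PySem

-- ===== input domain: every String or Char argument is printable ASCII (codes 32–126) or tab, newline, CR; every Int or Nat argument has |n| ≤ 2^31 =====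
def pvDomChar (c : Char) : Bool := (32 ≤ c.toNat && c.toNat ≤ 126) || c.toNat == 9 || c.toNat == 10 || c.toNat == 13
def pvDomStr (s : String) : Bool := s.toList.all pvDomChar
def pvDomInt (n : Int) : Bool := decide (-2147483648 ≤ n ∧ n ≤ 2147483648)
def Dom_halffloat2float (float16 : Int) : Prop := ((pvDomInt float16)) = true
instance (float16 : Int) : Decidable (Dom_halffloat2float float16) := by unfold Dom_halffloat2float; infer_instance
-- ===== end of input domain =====

-- B replaces A's shift-until-bit-10 subnormal loop with a closed form driven by
-- fraction.bit_length() and merges the duplicated final assembly (objective: simpler).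

-- ===== PORT A =====
-- A's `while not (fraction & 0x400)` loop; fuel 11 only makes the recursion structural:
-- the loop is entered with 1 ≤ fraction ≤ 1023, so at most 10 iterations ever run.
def pvNormLoop : Nat → Int → Int → Int × Int
  | 0, fraction, exponent => (fraction, exponent)
  | Nat.succ k, fraction, exponent =>
    if PySem.Int.band fraction 1024 = 0 then
      pvNormLoop k (fraction <<< 1) (exponent - 1)
    else (fraction, exponent)

-- the shared fall-through tail of A (exponent += 112; fraction <<= 13; assemble)
def pvTailA (sign exponent fraction : Int) : Int :=
  let exponent := exponent + (127 - 15)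
  let fraction := fraction <<< 13
  PySem.Int.bor (PySem.Int.bor (sign <<< 31) (exponent <<< 23)) fraction

def halffloat2float (float16 : Int) : Int :=
  let sign := PySem.Int.band (float16 >>> 15) 1
  let exponent := PySem.Int.band (float16 >>> 10) 31
  let fraction := PySem.Int.band float16 1023
  if exponent = 0 then
    if fraction = 0 then sign <<< 31
    else
      let p := pvNormLoop 11 fraction exponent
      let exponent := p.2 + 1
      let fraction := PySem.Int.band p.1 (Int.not 1024)
      pvTailA sign exponent fraction
  else if exponent = 31 then
    if fraction = 0 then PySem.Int.bor (sign <<< 31) 0x7f800000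
    else PySem.Int.bor (PySem.Int.bor (sign <<< 31) 0x7f800000) (fraction <<< 13)
  else pvTailA sign exponent fraction

-- ===== PORT B =====
def halffloat2float_alt (float16 : Int) : Int :=
  let sign := PySem.Int.band (float16 >>> 15) 1
  let exponent := PySem.Int.band (float16 >>> 10) 31
  let fraction := PySem.Int.band float16 1023
  if exponent = 31 then
    PySem.Int.bor (PySem.Int.bor (sign <<< 31) 0x7f800000) (fraction <<< 13)
  else if exponent = 0 ∧ fraction = 0 then sign <<< 31
  else
    let p :=
      if exponent = 0 then
        let shift := 11 - PySem.Int.bitLength fraction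
        (1 - (shift : Int), PySem.Int.band (fraction <<< shift) 1023)
      else (exponent, fraction)
    PySem.Int.bor (PySem.Int.bor (sign <<< 31) ((p.1 + 112) <<< 23)) (p.2 <<< 13)

-- ===== PRECONDITION & SPEC =====
def Spec_halffloat2float (float16 : Int) (out : Int) : Prop := out = halffloat2float_alt float16
instance (float16 : Int) (out : Int) : Decidable (Spec_halffloat2float float16 out) := by unfold Spec_halffloat2float; infer_instance

-- ===== CLAIM (what is proved, stated in full; the proofs are below) =====
def Claim_equal_halffloat2float : Prop := ∀ (float16 : Int), Dom_halffloat2float float16 → Spec_halffloat2float float16 (halffloat2float float16)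

-- ===== LEMMAS AND PROOFS =====

-- masking with 1023 lands in [0, 1023] for every Int
lemma band_mask1023_range (a : Int) :
    0 ≤ PySem.Int.band a 1023 ∧ PySem.Int.band a 1023 ≤ 1023 := by
  unfold PySem.Int.band
  split_ifs with h1 h2 h2 <;> simp_all
  exact Nat.and_le_right

set_option maxRecDepth 10000 in
-- the loop/closed-form agreement, verified for every fraction 1..1023
lemma loop_closed_eq : ∀ n : Nat, n < 1024 → n ≠ 0 →
    ((pvNormLoop 11 (n : Int) 0).2 + 1 = 1 - ((11 - PySem.Int.bitLength (n : Int) : Nat) : Int)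
     ∧ PySem.Int.band (pvNormLoop 11 (n : Int) 0).1 (Int.not 1024)
       = PySem.Int.band ((n : Int) <<< (11 - PySem.Int.bitLength (n : Int))) 1023) := by
  decide

-- ===== VERDICT =====
theorem halffloat2float_spec : Claim_equal_halffloat2float := by
  intro x _
  unfold Spec_halffloat2float halffloat2float halffloat2float_alt
  obtain ⟨hf0, hf1⟩ := band_mask1023_range x
  set s := PySem.Int.band (x >>> 15) 1 with hs
  set e := PySem.Int.band (x >>> 10) 31 with he
  set f := PySem.Int.band x 1023 with hf
  by_cases h31 : e = 31
  · by_cases hfz : f = 0 <;> simp [h31, hfz]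
  · by_cases h0 : e = 0
    · by_cases hfz : f = 0
      · simp [h0, hfz]
      · have hn : f = ((f.toNat : Int)) := by omega
        have hlt : f.toNat < 1024 := by omega
        have hne : f.toNat ≠ 0 := by omega
        obtain ⟨he', hf'⟩ := loop_closed_eq f.toNat hlt hne
        rw [← hn] at he' hf'
        simp only [h0, hfz, if_true, if_false, pvTailA]
        rw [he', hf']
        norm_num
    · simp only [if_neg h0, if_neg h31, pvTailA]
      norm_num
      intro h; exact absurd h h0
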